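-- pv_equiv track=rewrite | github.com/allandeee/AI329_Ass3 | main.py | play_ind
-- ===== SOURCE A (Python) =====
-- def play_ind(bits):
--     score = 0
--     opp_sc = 0
--     for p1, p2 in zip(bits[0::2], bits[1::2]):
--         if p1 == '1':
--             if p2 == '1':
--                 score += 3
--                 opp_sc += 3
--             else:
--                 score += 0
--                 opp_sc += 5
--         else:
--             if p2 == '1':
--                 score += 5
--                 opp_sc += 0
--             else:
--                 score += 1
--                 opp_sc += 1
--     return score, opp_sc
-- ===== SOURCE B (Python) =====
-- def play_ind(bits):
--     # Three independent tallies over index ranges + a derived linear formula;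
--     # no per-pair four-way branching.
--     P = len(bits) // 2
--     E = sum(bits[i] == '1' for i in range(0, 2 * P, 2))
--     O = sum(bits[i] == '1' for i in range(1, 2 * P, 2))
--     M = sum(bits[i] == '1' and bits[i + 1] == '1' for i in range(0, 2 * P, 2))
--     return (P + 4 * O - E - M, P + 4 * E - O - M)
-- ===== Notes on version B (the rewrite author's own statement) =====
-- stated objective: alternative
-- what changed: B replaces A's single zip-loop with its per-pair four-way branch accumulation by three independent index-range tallies (first-of-pair '1's, second-of-pair '1's, both-'1' pairs) combined afterwards by a derived linear formula score = P + 4*O - E - M, opp = P + 4*E - O - M.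
import Mathlib
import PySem

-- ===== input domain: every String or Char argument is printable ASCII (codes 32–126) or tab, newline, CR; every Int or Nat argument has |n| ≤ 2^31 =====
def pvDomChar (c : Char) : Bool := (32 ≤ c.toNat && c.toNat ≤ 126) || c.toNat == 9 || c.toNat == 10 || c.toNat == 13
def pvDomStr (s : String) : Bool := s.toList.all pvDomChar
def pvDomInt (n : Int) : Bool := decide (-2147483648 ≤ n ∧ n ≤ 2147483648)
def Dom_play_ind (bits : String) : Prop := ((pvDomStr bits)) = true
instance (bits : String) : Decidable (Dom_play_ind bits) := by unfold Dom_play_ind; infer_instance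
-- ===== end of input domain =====

-- B replaces A's per-pair four-way branch accumulation by three independent index-range tallies
-- (first-of-pair '1's, second-of-pair '1's, both-'1' pairs) combined by a derived linear formula
-- (alternative decomposition, same cost).

-- ===== PORT A =====
-- for p1, p2 in zip(bits[0::2], bits[1::2]): accumulate score/opp_sc per pair, branches in A's order.
-- (slice? with step 2 is always 'some'; getD "" only discharges the Option.)
def play_ind (bits : String) : Int × Int :=
  let s1 := (PySem.Str.slice? bits (some 0) none 2).getD ""
  let s2 := (PySem.Str.slice? bits (some 1) none 2).getD ""
  (List.zip s1.toList s2.toList).foldl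
    (fun (acc : Int × Int) (p : Char × Char) =>
      if p.1 = '1' then
        if p.2 = '1' then (acc.1 + 3, acc.2 + 3) else (acc.1 + 0, acc.2 + 5)
      else
        if p.2 = '1' then (acc.1 + 5, acc.2 + 0) else (acc.1 + 1, acc.2 + 1))
    (0, 0)

-- ===== PORT B =====
-- Source B's three tallies: 'sum(bits[i] == '1' for i in range(0, 2*P, 2))' — the index set
-- {0,2,…,2P-2} is enumerated as 2*k for k in range(P) (same indices, same order).
def cntE (l : List Char) : Int :=
  ((List.range (l.length / 2)).filter (fun k => l[2 * k]? == some '1')).length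
def cntO (l : List Char) : Int :=
  ((List.range (l.length / 2)).filter (fun k => l[2 * k + 1]? == some '1')).length
def cntM (l : List Char) : Int :=
  ((List.range (l.length / 2)).filter
    (fun k => (l[2 * k]? == some '1') && (l[2 * k + 1]? == some '1'))).length

def play_ind_alt (bits : String) : Int × Int :=
  let l := bits.toList
  let P : Int := ((l.length / 2 : Nat) : Int)
  (P + 4 * cntO l - cntE l - cntM l, P + 4 * cntE l - cntO l - cntM l)

-- ===== PRECONDITION & SPEC =====
def Spec_play_ind (bits : String) (out : Int × Int) : Prop := out = play_ind_alt bits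
instance (bits : String) (out : Int × Int) : Decidable (Spec_play_ind bits out) := by unfold Spec_play_ind; infer_instance

-- ===== CLAIM =====
def Claim_equal_play_ind : Prop := ∀ (bits : String), Dom_play_ind bits → Spec_play_ind bits (play_ind bits)

-- ===== LEMMAS AND PROOFS =====

-- the elements of l at even positions, i.e. l[0::2]
def every2 {α : Type} : List α → List α
  | a :: _ :: rest => a :: every2 rest
  | [a] => [a]
  | [] => []

theorem slice?_even {α : Type} (xs : List α) :
    PySem.List.slice? xs (some 0) none 2 =
      some ((List.range ((xs.length + 1) / 2)).filterMap (fun k => xs[2 * k]?)) := by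
  unfold PySem.List.slice? PySem.List.sliceIndices
  norm_num
  have hc : (if 0 < xs.length then (((xs.length : Int) + 2 - 1) / 2).toNat else 0)
      = (xs.length + 1) / 2 := by split <;> omega
  rw [hc]
  apply List.filterMap_congr
  intro k _
  congr 1

theorem slice?_odd {α : Type} (xs : List α) :
    PySem.List.slice? xs (some 1) none 2 =
      some ((List.range (xs.length / 2)).filterMap (fun k => xs[2 * k + 1]?)) := by
  unfold PySem.List.slice? PySem.List.sliceIndices
  norm_num
  have hc : (if 1 < xs.length
        then (((xs.length : Int) - min 1 (xs.length : Int) + 2 - 1) / 2).toNat else 0)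
      = xs.length / 2 := by split <;> omega
  rw [hc]
  apply List.filterMap_congr
  intro k hk
  have hk' : k < xs.length / 2 := List.mem_range.mp hk
  congr 1
  omega

theorem every2_eq_filterMap {α : Type} (xs : List α) :
    (List.range ((xs.length + 1) / 2)).filterMap (fun k => xs[2 * k]?) = every2 xs := by
  induction xs using every2.induct with
  | case1 a b rest ih =>
    have hl : ((a :: b :: rest).length + 1) / 2 = (rest.length + 1) / 2 + 1 := by
      simp; omega
    rw [hl, List.range_succ_eq_map, List.filterMap_cons, List.filterMap_map]
    simp only [every2]
    simpa using ih
  | case2 a => simp [every2, List.range_succ]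
  | case3 => simp [every2]

theorem every2_cons_tail {α : Type} (b : α) (rest : List α) :
    every2 (b :: rest) = b :: every2 rest.tail := by
  match rest with
  | [] => simp [every2]
  | c :: r' => simp [every2]

theorem every2_tail_eq_filterMap {α : Type} (xs : List α) :
    (List.range (xs.length / 2)).filterMap (fun k => xs[2 * k + 1]?) = every2 xs.tail := by
  induction xs using every2.induct with
  | case1 a b rest ih =>
    have hl : (a :: b :: rest).length / 2 = rest.length / 2 + 1 := by simp; omega
    rw [hl, List.range_succ_eq_map, List.filterMap_cons, List.filterMap_map]
    simp only [List.tail_cons]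
    rw [every2_cons_tail]
    simpa using ih
  | case2 a => simp [every2]
  | case3 => simp [every2]

-- step lemmas: each tally on a::b::r is its pair-0 contribution plus the tally on r
theorem len2 (a b : Char) (r : List Char) : (a :: b :: r).length / 2 = r.length / 2 + 1 := by
  simp; omega

theorem cntE_cons2 (a b : Char) (r : List Char) :
    cntE (a :: b :: r) = (if a = '1' then 1 else 0) + cntE r := by
  unfold cntE
  rw [len2, List.range_succ_eq_map, List.filter_cons, List.filter_map]
  have hp : ∀ k : Nat, ((a :: b :: r)[2 * (k + 1)]? == some '1')
      = (r[2 * k]? == some '1') := by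
    intro k
    have h2 : 2 * (k + 1) = 2 * k + 1 + 1 := by ring
    rw [h2]
    simp
  simp only [Function.comp_def, hp]
  by_cases ha : a = '1' <;> simp [ha]; ring

theorem cntO_cons2 (a b : Char) (r : List Char) :
    cntO (a :: b :: r) = (if b = '1' then 1 else 0) + cntO r := by
  unfold cntO
  rw [len2, List.range_succ_eq_map, List.filter_cons, List.filter_map]
  have hp : ∀ k : Nat, ((a :: b :: r)[2 * (k + 1) + 1]? == some '1')
      = (r[2 * k + 1]? == some '1') := by
    intro k
    have h2 : 2 * (k + 1) + 1 = (2 * k + 1) + 1 + 1 := by ring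
    rw [h2]
    simp
  simp only [Function.comp_def, hp]
  by_cases hb : b = '1' <;> simp [hb]; ring

theorem cntM_cons2 (a b : Char) (r : List Char) :
    cntM (a :: b :: r) = (if a = '1' ∧ b = '1' then 1 else 0) + cntM r := by
  unfold cntM
  rw [len2, List.range_succ_eq_map, List.filter_cons, List.filter_map]
  have hp : ∀ k : Nat, (((a :: b :: r)[2 * (k + 1)]? == some '1')
        && ((a :: b :: r)[2 * (k + 1) + 1]? == some '1'))
      = ((r[2 * k]? == some '1') && (r[2 * k + 1]? == some '1')) := by
    intro k
    have h2 : 2 * (k + 1) = 2 * k + 1 + 1 := by ring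
    have h3 : 2 * (k + 1) + 1 = (2 * k + 1) + 1 + 1 := by ring
    rw [h3, h2]
    simp
  simp only [Function.comp_def, hp]
  by_cases ha : a = '1' <;> by_cases hb : b = '1' <;> simp [ha, hb]; ring

theorem cnt_short (l : List Char) (h : l.length / 2 = 0) :
    cntE l = 0 ∧ cntO l = 0 ∧ cntM l = 0 := by
  unfold cntE cntO cntM
  rw [h]
  simp

theorem main_lemma (l : List Char) (s t : Int) :
    (List.zip (every2 l) (every2 l.tail)).foldl
      (fun (acc : Int × Int) (p : Char × Char) =>
        if p.1 = '1' then
          if p.2 = '1' then (acc.1 + 3, acc.2 + 3) else (acc.1 + 0, acc.2 + 5)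
        else
          if p.2 = '1' then (acc.1 + 5, acc.2 + 0) else (acc.1 + 1, acc.2 + 1))
      (s, t) =
    (s + ((l.length / 2 : Nat) : Int) + 4 * cntO l - cntE l - cntM l,
     t + ((l.length / 2 : Nat) : Int) + 4 * cntE l - cntO l - cntM l) := by
  induction l using every2.induct generalizing s t with
  | case1 a b rest ih =>
    rw [show every2 (a :: b :: rest) = a :: every2 rest from rfl, List.tail_cons,
      every2_cons_tail, List.zip_cons_cons, List.foldl_cons]
    rw [cntE_cons2, cntO_cons2, cntM_cons2, len2]
    by_cases ha : a = '1' <;> by_cases hb : b = '1' <;>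
      simp only [ha, hb, if_true, if_false] <;>
      rw [ih] <;>
      · simp
        constructor <;> ring
  | case2 a =>
    have h := cnt_short [a] (by simp)
    simp [every2, h.1, h.2.1, h.2.2]
  | case3 =>
    have h := cnt_short [] (by simp)
    simp [every2, h.1, h.2.1, h.2.2]

-- ===== VERDICT =====
theorem play_ind_spec : Claim_equal_play_ind := by
  intro bits _
  unfold Spec_play_ind play_ind play_ind_alt
  simp only [PySem.Str.slice?, PySem.Chars.slice?, slice?_even, slice?_odd,
    Option.map_some, Option.getD_some, String.toList_ofList]
  rw [every2_eq_filterMap, every2_tail_eq_filterMap]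
  have := main_lemma bits.toList 0 0
  rw [this]
  simp
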